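-- pv_equiv track=rewrite | github.com/TurtleTools/portein | portein/plot/secondary_structure.py | get_ss_elements
-- ===== SOURCE A (Python) =====
-- SS_DICT = {
--     "H": "H",
--     "G": "H",
--     "I": "H",
--     "B": "E",
--     "E": "E",
--     "T": "T",
--     "S": "T",
--     "C": "T",
-- }
--
-- def get_ss_elements(ss_list):
--     ss_blocks = []
--     prev_ss = None
--     prev_i = 0
--     for i, ss in enumerate(ss_list):
--         ss = SS_DICT.get(ss, "T")
--         if prev_ss is None:
--             prev_ss = ss
--         if ss != prev_ss:
--             ss_blocks.append((prev_ss, prev_i, i))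
--             prev_ss = ss
--             prev_i = i
--     ss_blocks.append((SS_DICT.get(ss_list[-1], "T"), prev_i, len(ss_list) - 1))
--     return ss_blocks
-- ===== SOURCE B (Python) =====
-- SS_DICT = {
--     "H": "H",
--     "G": "H",
--     "I": "H",
--     "B": "E",
--     "E": "E",
--     "T": "T",
--     "S": "T",
--     "C": "T",
-- }
--
-- def get_ss_elements(ss_list):
--     mapped = [SS_DICT.get(s, "T") for s in ss_list]
--     starts = [i for i in range(1, len(mapped)) if mapped[i] != mapped[i - 1]]
--     ends = starts + [len(mapped) - 1]
--     return [(mapped[s], s, e) for s, e in zip([0] + starts, ends)]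
-- ===== Notes on version B (the rewrite author's own statement) =====
-- stated objective: idiomatic
-- what changed: Replaces A's stateful loop (Option previous-code, running start index, trailing append) by a comprehension pipeline: map the codes once, collect change indices with a filter over range, and zip consecutive boundaries into blocks.
import Mathlib
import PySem

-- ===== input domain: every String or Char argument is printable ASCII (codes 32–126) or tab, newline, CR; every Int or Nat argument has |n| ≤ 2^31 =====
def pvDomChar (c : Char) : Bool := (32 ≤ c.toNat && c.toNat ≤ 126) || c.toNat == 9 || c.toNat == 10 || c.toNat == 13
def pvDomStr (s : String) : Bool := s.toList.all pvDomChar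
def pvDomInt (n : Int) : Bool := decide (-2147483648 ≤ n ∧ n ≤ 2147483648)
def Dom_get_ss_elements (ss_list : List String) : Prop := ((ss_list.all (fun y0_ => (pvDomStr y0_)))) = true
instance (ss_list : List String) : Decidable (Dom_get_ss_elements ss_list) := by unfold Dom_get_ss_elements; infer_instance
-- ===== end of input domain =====

-- B replaces A's stateful loop (Option-typed previous code, running start index, trailing
-- append) by a comprehension pipeline: map the codes once, collect the change indices with a
-- filter, and zip consecutive boundaries into blocks.  Objective: idiomatic; same O(n) cost.

-- ===== PORT A =====
def ssDict : PySem.Dict String String :=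
  PySem.Dict.ofList [("H","H"),("G","H"),("I","H"),("B","E"),("E","E"),("T","T"),("S","T"),("C","T")]

-- SS_DICT.get(ss, "T")
def ssMap (s : String) : String := PySem.Dict.getD ssDict s "T"

-- A's loop body; state = (ss_blocks, prev_ss, prev_i, i)
def stepA (st : List (String × Int × Int) × Option String × Int × Int) (ss : String) :
    List (String × Int × Int) × Option String × Int × Int :=
  let prev := match st.2.1 with | none => ss | some q => q   -- "if prev_ss is None: prev_ss = ss"
  if ss ≠ prev then (st.1 ++ [(prev, st.2.2.1, st.2.2.2)], some ss, st.2.2.2, st.2.2.2 + 1)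
  else (st.1, some prev, st.2.2.1, st.2.2.2 + 1)

def get_ss_elements (ss_list : List String) : List (String × Int × Int) :=
  let r := ss_list.foldl (fun st s => stepA st (ssMap s)) ([], none, 0, 0)
  -- ss_blocks.append((SS_DICT.get(ss_list[-1], "T"), prev_i, len(ss_list) - 1));
  -- ss_list[-1] raises IndexError on [], excluded by Pre_ (the .getD "" is never taken there)
  r.1 ++ [(ssMap ((PySem.List.pyGet? ss_list (-1)).getD ""), r.2.2.1, (ss_list.length : Int) - 1)]

-- ===== PORT B =====
def get_ss_elements_alt (ss_list : List String) : List (String × Int × Int) :=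
  let mapped := ss_list.map ssMap
  let n : Int := (ss_list.length : Int)
  -- starts = [i for i in range(1, len(mapped)) if mapped[i] != mapped[i - 1]]  (indices in range)
  let starts := (PySem.List.pyRange 1 n 1).filter
      (fun i => PySem.List.pyGet? mapped i ≠ PySem.List.pyGet? mapped (i - 1))
  let ends := starts ++ [n - 1]
  -- [(mapped[s], s, e) for s, e in zip([0] + starts, ends)]; mapped[s] raises on [], outside Pre_
  (List.zip ((0 : Int) :: starts) ends).map
      (fun p => ((PySem.List.pyGet? mapped p.1).getD "", p.1, p.2))

-- ===== PRECONDITION & SPEC =====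
-- Pre_ excludes only the empty list, on which A raises IndexError (ss_list[-1]).
def Pre_get_ss_elements (ss_list : List String) : Prop := ss_list ≠ []
instance (ss_list : List String) : Decidable (Pre_get_ss_elements ss_list) := by
  unfold Pre_get_ss_elements; infer_instance
def pvWitness_get_ss_elements : List String := ["H", "H", "E", "T"]

def Spec_get_ss_elements (ss_list : List String) (out : List (String × Int × Int)) : Prop := out = get_ss_elements_alt ss_list
instance (ss_list : List String) (out : List (String × Int × Int)) : Decidable (Spec_get_ss_elements ss_list out) := by unfold Spec_get_ss_elements; infer_instance

-- ===== CLAIM (what is proved, stated in full; the proofs are below) =====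
def Claim_equal_get_ss_elements : Prop := ∀ (ss_list : List String), Dom_get_ss_elements ss_list → Pre_get_ss_elements ss_list → Spec_get_ss_elements ss_list (get_ss_elements ss_list)

-- ===== LEMMAS AND PROOFS =====

-- common reference: blocks of the run grouping of `rest`, current run = (key, start),
-- next index = i, final block ends at nm1
def G (nm1 : Int) : String → Int → Int → List String → List (String × Int × Int)
  | key, start, _, [] => [(key, start, nm1)]
  | key, start, i, x :: xs =>
      if x = key then G nm1 key start (i + 1) xs
      else (key, start, i) :: G nm1 x i (i + 1) xs

theorem getLastD_cons (x d : String) (xs : List String) :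
    (x :: xs).getLast?.getD d = xs.getLast?.getD x := by
  induction xs with
  | nil => simp
  | cons y ys ih => cases ys <;> simp_all [List.getLast?_cons_cons]

theorem stepA_some (blocks : List (String × Int × Int)) (key : String) (start i : Int) (x : String) :
    stepA (blocks, some key, start, i) x =
      if x = key then (blocks, some key, start, i + 1)
      else (blocks ++ [(key, start, i)], some x, i, i + 1) := by
  by_cases h : x = key <;> simp [stepA, h]

theorem LA (nm1 : Int) (rest : List String) :
    ∀ (key : String) (start i : Int) (blocks : List (String × Int × Int)),
    (rest.foldl stepA (blocks, some key, start, i)).1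
      ++ [(rest.getLast?.getD key, (rest.foldl stepA (blocks, some key, start, i)).2.2.1, nm1)]
    = blocks ++ G nm1 key start i rest := by
  induction rest with
  | nil => intro key start i blocks; simp [G]
  | cons x xs ih =>
    intro key start i blocks
    rw [List.foldl_cons, stepA_some, getLastD_cons]
    by_cases h : x = key
    · subst h
      rw [if_pos rfl]
      simpa [G] using ih x start (i + 1) blocks
    · rw [if_neg h]
      have := ih x i (i + 1) (blocks ++ [(key, start, i)])
      simp only [List.append_assoc, List.singleton_append] at this ⊢
      rw [this]; simp [G, h]

theorem LB (m : List String) (rest : List String) :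
    ∀ (i : Nat) (key : String) (start : Int),
    rest = m.drop i → 1 ≤ i →
    (PySem.List.pyGet? m start).getD "" = key →
    (PySem.List.pyGet? m ((i : Int) - 1)).getD "" = key →
    (List.zip (start :: (PySem.List.pyRange (i : Int) (m.length : Int) 1).filter
          (fun j => PySem.List.pyGet? m j ≠ PySem.List.pyGet? m (j - 1)))
        (((PySem.List.pyRange (i : Int) (m.length : Int) 1).filter
          (fun j => PySem.List.pyGet? m j ≠ PySem.List.pyGet? m (j - 1))) ++ [(m.length : Int) - 1])).map
      (fun p => ((PySem.List.pyGet? m p.1).getD "", p.1, p.2))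
    = G ((m.length : Int) - 1) key start (i : Int) rest := by
  induction rest with
  | nil =>
    intro i key start hdrop _ h3 _
    have hlen : m.length ≤ i := List.drop_eq_nil_iff.mp hdrop.symm
    rw [PySem.List.pyRange_one_eq_nil (by exact_mod_cast hlen)]
    simp [G, h3]
  | cons x xs ih =>
    intro i key start hdrop hi h3 h4
    have hx : m[i]? = some x := by
      have h0 : (m.drop i)[0]? = some x := by rw [← hdrop]; rfl
      rw [List.getElem?_drop] at h0; simpa using h0
    have hilt : i < m.length := by
      rcases List.getElem?_eq_some_iff.mp hx with ⟨h', _⟩; exact h'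
    have hdrop' : xs = m.drop (i + 1) := by
      have h1 : m.drop (i + 1) = (m.drop i).drop 1 := by rw [List.drop_drop]
      rw [h1, ← hdrop]; simp
    have hgi : PySem.List.pyGet? m (i : Int) = some x := by
      rw [PySem.List.pyGet?_natCast]; exact hx
    have hgi1 : (PySem.List.pyGet? m ((i : Int))).getD "" = x := by rw [hgi]; rfl
    have hprev : PySem.List.pyGet? m ((i : Int) - 1) = some (m[i-1]) := by
      have hcast : ((i : Int) - 1) = ((i - 1 : Nat) : Int) := by omega
      rw [hcast, PySem.List.pyGet?_natCast, List.getElem?_eq_getElem (by omega)]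
    have hkey : m[i-1] = key := by
      rw [hprev] at h4; simpa using h4
    have hcons : PySem.List.pyRange (i : Int) (m.length : Int) 1
        = (i : Int) :: PySem.List.pyRange ((i : Int) + 1) (m.length : Int) 1 :=
      PySem.List.pyRange_one_cons (by exact_mod_cast hilt)
    have hsucc : ((i : Int) + 1) = ((i + 1 : Nat) : Int) := by omega
    rw [hcons, List.filter_cons, hgi, hprev, hkey]
    by_cases h : x = key
    · -- no change at i: filter drops index i
      rw [if_neg (by simp [h])]
      rw [hsucc]
      have := ih (i + 1) key start hdrop' (by omega) h3
        (by rw [show ((i + 1 : Nat) : Int) - 1 = (i : Int) by omega, hgi]; simpa using h)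
      rw [this]
      simp [G, h]
    · -- change at i: index i survives the filter
      rw [if_pos (by simp [h])]
      rw [hsucc]
      have := ih (i + 1) x (i : Int) hdrop' (by omega) hgi1
        (by rw [show ((i + 1 : Nat) : Int) - 1 = (i : Int) by omega]; exact hgi1)
      simp only [List.zip_cons_cons, List.cons_append, List.map_cons]
      rw [this]
      simp [G, h, h3]

theorem lastMap (s : String) (tl : List String) :
    ssMap ((s :: tl).getLast?.getD "") = (tl.map ssMap).getLast?.getD (ssMap s) := by
  rw [getLastD_cons, List.getLast?_map]
  cases tl.getLast? <;> rfl

-- ===== VERDICT (by name: the statement is the Claim_ definition above) =====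
theorem get_ss_elements_spec : Claim_equal_get_ss_elements := by
  intro ss_list _ hpre
  unfold Spec_get_ss_elements
  obtain ⟨s, tl, rfl⟩ : ∃ s tl, ss_list = s :: tl := by
    cases ss_list with
    | nil => exact absurd rfl hpre
    | cons a l => exact ⟨a, l, rfl⟩
  unfold get_ss_elements get_ss_elements_alt
  -- A side: unroll the first iteration, push the map into the fold
  have hfirst : stepA ([], none, 0, 0) (ssMap s) = ([], some (ssMap s), 0, 1) := by
    simp [stepA]
  have hfold : (s :: tl).foldl (fun st y => stepA st (ssMap y)) ([], none, 0, 0)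
      = (tl.map ssMap).foldl stepA ([], some (ssMap s), 0, 1) := by
    rw [List.foldl_cons, hfirst, List.foldl_map]
  simp only [hfold, PySem.List.pyGet?_neg_one]
  have hA := LA (((s :: tl).length : Int) - 1) (tl.map ssMap) (ssMap s) 0 1 []
  rw [lastMap s tl, hA]
  -- B side
  have hm : (s :: tl).map ssMap = ssMap s :: tl.map ssMap := by simp
  have hB := LB ((s :: tl).map ssMap) (tl.map ssMap) 1 (ssMap s) 0
    (by simp) (le_refl 1)
    (by rw [hm, PySem.List.pyGet?_zero_cons]; rfl)
    (by norm_num)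
  simp only [List.length_map] at hB ⊢
  simp only [Nat.cast_one] at hB
  rw [List.nil_append, hB]
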